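-- pv_equiv track=rewrite | github.com/tejaskannan/smart-tv-keyboard-leakage | smarttvleakage/suggestions_model/determine_autocomplete.py | get_transforms
-- ===== SOURCE A (Python) =====
-- def get_transforms(size : int):
--     """Returns all the transforms for a given bin size"""
--     transforms = {}
--     bins = 2
--     while size * (bins-1) < 10:
--         new_transform = [0, 0, 0, 0, 0, 0, 0, 0, 0, 0]
--         for b in range(1, bins):
--
--             start = size*b
--             for i in range(start, 10):
--                 new_transform[i] += 1
--         transforms[bins] = new_transform
--         bins += 1
--
--     return transforms
-- ===== SOURCE B (Python) =====
-- def get_transforms(size : int):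
--     """Returns all the transforms for a given bin size"""
--     transforms = {}
--     bins = 2
--     while size * (bins - 1) < 10:
--         transforms[bins] = [min(bins - 1, i // size) for i in range(10)]
--         bins += 1
--     return transforms
-- ===== Notes on version B (the rewrite author's own statement) =====
-- stated objective: alternative
-- what changed: B computes each of the ten entries directly by the closed form min(bins-1, i//size) instead of A's nested b/i loops that rebuild the array by repeated unit increments.
import Mathlib
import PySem

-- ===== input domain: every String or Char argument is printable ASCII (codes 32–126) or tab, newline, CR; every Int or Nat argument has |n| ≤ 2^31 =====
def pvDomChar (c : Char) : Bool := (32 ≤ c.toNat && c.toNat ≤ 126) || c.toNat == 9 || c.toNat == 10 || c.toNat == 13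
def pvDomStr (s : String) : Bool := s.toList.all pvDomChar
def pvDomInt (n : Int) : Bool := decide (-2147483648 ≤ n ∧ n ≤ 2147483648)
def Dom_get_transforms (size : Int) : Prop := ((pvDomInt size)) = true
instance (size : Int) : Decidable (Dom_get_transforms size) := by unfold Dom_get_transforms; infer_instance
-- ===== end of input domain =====

-- B replaces A's rebuild-by-repeated-increment nested loops with a closed form for each
-- entry: transform[i] = min(bins-1, i // size) (objective: alternative).

-- ===== PORT A =====
-- A's while loop; fuel 12 suffices for every size ≥ 1 (at most 9 iterations)
def pvAloop : Nat → Int → Int → PySem.Dict Int (List Int) → PySem.Dict Int (List Int)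
  | 0, _, _, d => d
  | n+1, size, bins, d =>
    if size * (bins - 1) < 10 then
      let nt := (PySem.List.pyRange 1 bins 1).foldl (fun t b =>
          let start := size * b
          (PySem.List.pyRange start 10 1).foldl (fun t i =>
            PySem.List.pySetD t i (PySem.List.pyGetD t i 0 + 1)) t)
        [0, 0, 0, 0, 0, 0, 0, 0, 0, 0]
      pvAloop n size (bins + 1) (d.insert bins nt)
    else d

def get_transforms (size : Int) : List (Int × List Int) :=
  (pvAloop 12 size 2 PySem.Dict.empty).items

-- ===== PORT B =====
def pvBloop : Nat → Int → Int → PySem.Dict Int (List Int) → PySem.Dict Int (List Int)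
  | 0, _, _, d => d
  | n+1, size, bins, d =>
    if size * (bins - 1) < 10 then
      pvBloop n size (bins + 1)
        (d.insert bins ((PySem.List.pyRange 0 10 1).map
          (fun i => min (bins - 1) (PySem.Int.floordiv i size))))
    else d

def get_transforms_alt (size : Int) : List (Int × List Int) :=
  (pvBloop 12 size 2 PySem.Dict.empty).items

-- ===== PRECONDITION & SPEC =====
-- Pre_ excludes size ≤ 0: for size ≤ 0 A's while-condition never becomes false and
-- Python A loops forever, returning nothing.
def Pre_get_transforms (size : Int) : Prop := 1 ≤ size
instance (size : Int) : Decidable (Pre_get_transforms size) := by unfold Pre_get_transforms; infer_instance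
def pvWitness_get_transforms : Int := 3

def Spec_get_transforms (size : Int) (out : List (Int × List Int)) : Prop := out = get_transforms_alt size
instance (size : Int) (out : List (Int × List Int)) : Decidable (Spec_get_transforms size out) := by unfold Spec_get_transforms; infer_instance

-- ===== CLAIM (what is proved, stated in full; the proofs are below) =====
def Claim_equal_get_transforms : Prop := ∀ (size : Int), Dom_get_transforms size → Pre_get_transforms size → Spec_get_transforms size (get_transforms size)

-- ===== LEMMAS AND PROOFS =====
-- For size ≥ 10 both loops stop at once: both return the empty dict.
lemma big_case (size : Int) (h : 10 ≤ size) :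
    get_transforms size = get_transforms_alt size := by
  have hc : ¬ size < 10 := by omega
  unfold get_transforms get_transforms_alt pvAloop pvBloop
  simp [hc]

-- ===== VERDICT (by name: the statement is the Claim_ definition above) =====
theorem get_transforms_spec : Claim_equal_get_transforms := by
  intro size _ hpre
  unfold Pre_get_transforms at hpre
  unfold Spec_get_transforms
  by_cases hbig : 10 ≤ size
  · exact big_case size hbig
  · interval_cases size <;> decide
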